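-- pv_equiv track=rewrite | github.com/alorchhota/courses | JHU_Computational_Genomics/HW1/10.FastqParser.py | summarize_reads
-- ===== SOURCE A (Python) =====
-- import collections
--
-- def phred33_to_q(qual):
--     """ Turn Phred+33 ASCII-encoded quality into Phred-scaled integer """
--     return ord(qual)-33
--
-- def countNucleotides(dna):
--     """ count neuclides in a dna string"""
--     counter = collections.Counter(dna)
--     return {c:counter[c] for c in 'ACGT'}
--
-- def summarize_reads(reads):
--     if len(reads) == 0:
--         raise Exception('Note enough reads')
--     nr = len(reads)
--     nnt = len(reads[0][1])
--     summary = []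
--     for pos in range(nnt):
--         dna = ''.join([r[1][pos] for r in reads])
--         counts = countNucleotides(dna)
--         counts['X'] = nr - sum(counts.values())
--         # quality
--         phred = [r[2][pos] for r in reads]
--         quality = [phred33_to_q(ph) for ph in phred]
--         counts['q'] = sum([1 for q in quality if q <20])
--         counts['Q'] = nr - counts['q']
--         # summary
--         summary.append([counts[c] for c in 'ACGTXqQ'])
--     # return
--     return(summary)
-- ===== SOURCE B (Python) =====
-- def _update(st, base, qual):
--     a, c, g, t, q = st
--     return (a + (base == 'A'), c + (base == 'C'), g + (base == 'G'),
--             t + (base == 'T'), q + (ord(qual) - 33 < 20))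
--
-- def summarize_reads(reads):
--     if len(reads) == 0:
--         raise Exception('Note enough reads')
--     nr = len(reads)
--     nnt = len(reads[0][1])
--     acc = [(0, 0, 0, 0, 0)] * nnt
--     for _, seq, qual in reads:
--         acc = [_update(st, seq[pos], qual[pos]) for pos, st in enumerate(acc)]
--     return [[a, c, g, t, nr - (a + c + g + t), q, nr - q] for a, c, g, t, q in acc]
-- ===== Notes on version B (the rewrite author's own statement) =====
-- stated objective: alternative
-- what changed: Replaces A's position-outer pass (which rebuilds a column string, a Counter and a fresh dict for every position) by a single read-major pass that maintains one per-position accumulator tuple, building each [A,C,G,T,X,q,Q] row from the accumulators at the end.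
import Mathlib
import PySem

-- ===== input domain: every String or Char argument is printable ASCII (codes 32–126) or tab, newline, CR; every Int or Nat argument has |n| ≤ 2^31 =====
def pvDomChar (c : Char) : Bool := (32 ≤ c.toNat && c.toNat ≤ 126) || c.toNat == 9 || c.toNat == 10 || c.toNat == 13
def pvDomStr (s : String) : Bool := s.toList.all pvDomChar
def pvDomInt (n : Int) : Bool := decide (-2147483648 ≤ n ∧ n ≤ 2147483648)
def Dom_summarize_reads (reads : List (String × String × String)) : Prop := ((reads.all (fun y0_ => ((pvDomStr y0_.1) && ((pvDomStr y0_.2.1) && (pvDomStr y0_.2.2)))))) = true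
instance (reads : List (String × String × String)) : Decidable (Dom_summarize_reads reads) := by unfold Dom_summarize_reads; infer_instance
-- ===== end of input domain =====

-- B replaces A's position-outer pass (rebuilding a column string and a Counter per position)
-- by a single read-major pass over per-position accumulators; same return value on Pre_.

-- ===== PORT A =====
def phred33_to_q (qual : Char) : Int := (qual.toNat : Int) - 33

def countNucleotides (dna : List Char) : PySem.Dict Char Int :=
  let counter := PySem.Dict.counter dna
  -- dict comprehension {c: counter[c] for c in 'ACGT'} ('ACGT' iterated char by char)
  (['A','C','G','T']).foldl (fun d c => d.insert c (counter.getD c 0)) PySem.Dict.empty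

def summarize_reads (reads : List (String × String × String)) : List (List Int) :=
  match reads with
  | [] => []   -- Python raises Exception('Note enough reads') here; excluded by Pre_
  | r0 :: _ =>
    let nr : Int := (reads.length : Int)
    let nnt : Int := (r0.2.1.toList.length : Int)   -- len(reads[0][1])
    (PySem.List.pyRange 0 nnt 1).map (fun pos =>
      -- dna = ''.join([r[1][pos] for r in reads]), kept as the list of its characters;
      -- pyGetD is exact under Pre_ (every r[1]/r[2] long enough, pos ≥ 0)
      let dna : List Char := reads.map (fun r => PySem.List.pyGetD r.2.1.toList pos ' ')
      let counts := countNucleotides dna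
      let counts := counts.insert 'X' (nr - counts.values.sum)
      let phred : List Char := reads.map (fun r => PySem.List.pyGetD r.2.2.toList pos ' ')
      let quality := phred.map phred33_to_q
      let counts := counts.insert 'q' (((quality.filter (fun q => q < 20)).map (fun _ => (1:Int))).sum)
      let counts := counts.insert 'Q' (nr - counts.getD 'q' 0)
      (['A','C','G','T','X','q','Q']).map (fun c => counts.getD c 0))

-- ===== PORT B =====
-- _update in Source B (Python bools added as 0/1 become if-then-else)
def pvUpdate (st : Int × Int × Int × Int × Int) (base qual : Char) : Int × Int × Int × Int × Int :=
  (st.1 + (if base = 'A' then 1 else 0), st.2.1 + (if base = 'C' then 1 else 0),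
   st.2.2.1 + (if base = 'G' then 1 else 0), st.2.2.2.1 + (if base = 'T' then 1 else 0),
   st.2.2.2.2 + (if (qual.toNat : Int) - 33 < 20 then 1 else 0))

def summarize_reads_alt (reads : List (String × String × String)) : List (List Int) :=
  match reads with
  | [] => []   -- Python raises Exception('Note enough reads') here; excluded by Pre_
  | r0 :: _ =>
    let nr : Int := (reads.length : Int)
    let nnt : Nat := r0.2.1.toList.length
    let init : List (Int × Int × Int × Int × Int) := List.replicate nnt (0, 0, 0, 0, 0)
    let acc := reads.foldl (fun acc r =>
      (PySem.List.enumerate acc).map (fun pst =>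
        pvUpdate pst.2 (PySem.List.pyGetD r.2.1.toList pst.1 ' ')
                       (PySem.List.pyGetD r.2.2.toList pst.1 ' '))) init
    acc.map (fun st =>
      [st.1, st.2.1, st.2.2.1, st.2.2.2.1,
       nr - (st.1 + st.2.1 + st.2.2.1 + st.2.2.2.1), st.2.2.2.2, nr - st.2.2.2.2])

-- ===== PRECONDITION & SPEC =====
-- Pre_ excludes the empty list (Python raises Exception) and reads whose sequence or quality
-- string is shorter than the first read's sequence (Python raises IndexError at r[1][pos]/r[2][pos]).
def Pre_summarize_reads (reads : List (String × String × String)) : Prop :=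
  reads ≠ [] ∧ ∀ r ∈ reads,
    (reads.headD ("", "", "")).2.1.toList.length ≤ r.2.1.toList.length ∧
    (reads.headD ("", "", "")).2.1.toList.length ≤ r.2.2.toList.length

instance (reads : List (String × String × String)) : Decidable (Pre_summarize_reads reads) := by
  unfold Pre_summarize_reads; infer_instance

def pvWitness_summarize_reads : (List (String × String × String)) :=
  [("r1", "ACN", "!I!"), ("r2", "AGTx", "!!!!")]

def Spec_summarize_reads (reads : List (String × String × String)) (out : List (List Int)) : Prop := out = summarize_reads_alt reads
instance (reads : List (String × String × String)) (out : List (List Int)) : Decidable (Spec_summarize_reads reads out) := by unfold Spec_summarize_reads; infer_instance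

-- ===== CLAIM (what is proved, stated in full; the proofs are below) =====
def Claim_equal_summarize_reads : Prop := ∀ (reads : List (String × String × String)), Dom_summarize_reads reads → Pre_summarize_reads reads → Spec_summarize_reads reads (summarize_reads reads)

-- ===== LEMMAS AND PROOFS =====

-- the per-read step of B's fold
def pvStep (acc : List (Int × Int × Int × Int × Int)) (r : String × String × String) :
    List (Int × Int × Int × Int × Int) :=
  (PySem.List.enumerate acc).map (fun pst =>
    pvUpdate pst.2 (PySem.List.pyGetD r.2.1.toList pst.1 ' ')
                   (PySem.List.pyGetD r.2.2.toList pst.1 ' '))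

lemma enum_map_getElem? {α β : Type} [Inhabited α] (f : Int × α → β) :
    ∀ (acc : List α) (s : Int) (pos : Nat), pos < acc.length →
    ((PySem.List.enumerate acc s).map f)[pos]? = some (f (s + pos, acc[pos]!)) := by
  intro acc
  induction acc with
  | nil => intro s pos h; simp at h
  | cons x xs ih =>
    intro s pos h
    rw [PySem.List.enumerate_cons]
    cases pos with
    | zero => simp
    | succ p =>
      simp only [List.map_cons, List.getElem?_cons_succ]
      rw [ih (s+1) p (by simpa using h)]
      have : s + 1 + (p : Int) = s + ((p : Nat) + 1 : Nat) := by push_cast; ring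
      simp [this]


lemma pvStep_length (acc : List (Int × Int × Int × Int × Int)) (r : String × String × String) :
    (pvStep acc r).length = acc.length := by
  simp [pvStep, PySem.List.length_enumerate]

lemma foldl_pvStep_length (reads : List (String × String × String)) :
    ∀ acc, (reads.foldl pvStep acc).length = acc.length := by
  induction reads with
  | nil => intro acc; rfl
  | cons r rs ih => intro acc; simp [List.foldl_cons, ih, pvStep_length]

lemma foldl_pvStep_getElem? (reads : List (String × String × String)) :
    ∀ (acc : List (Int × Int × Int × Int × Int)) (pos : Nat), pos < acc.length →
    (reads.foldl pvStep acc)[pos]? =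
      some (reads.foldl (fun st r =>
        pvUpdate st (r.2.1.toList.getD pos ' ') (r.2.2.toList.getD pos ' ')) acc[pos]!) := by
  induction reads with
  | nil => intro acc pos h; simp [List.getElem!_eq_getElem?_getD, List.getElem?_eq_getElem h]
  | cons r rs ih =>
    intro acc pos h
    simp only [List.foldl_cons]
    rw [ih (pvStep acc r) pos (by rw [pvStep_length]; exact h)]
    have hs : (pvStep acc r)[pos]! = pvUpdate acc[pos]! (r.2.1.toList.getD pos ' ') (r.2.2.toList.getD pos ' ') := by
      have := enum_map_getElem? (α := Int × Int × Int × Int × Int)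
        (f := fun pst => pvUpdate pst.2 (PySem.List.pyGetD r.2.1.toList pst.1 ' ')
                   (PySem.List.pyGetD r.2.2.toList pst.1 ' ')) acc 0 pos h
      simp only [pvStep]
      rw [List.getElem!_eq_getElem?_getD, this]
      simp [PySem.List.pyGetD_natCast]
    rw [hs]


lemma foldl_pvUpdate (pos : Nat) (reads : List (String × String × String)) :
    ∀ (a c g t q : Int),
    reads.foldl (fun st r =>
        pvUpdate st (r.2.1.toList.getD pos ' ') (r.2.2.toList.getD pos ' ')) (a, c, g, t, q)
    = (a + ((reads.map (fun r => r.2.1.toList.getD pos ' ')).count 'A' : Int),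
       c + ((reads.map (fun r => r.2.1.toList.getD pos ' ')).count 'C' : Int),
       g + ((reads.map (fun r => r.2.1.toList.getD pos ' ')).count 'G' : Int),
       t + ((reads.map (fun r => r.2.1.toList.getD pos ' ')).count 'T' : Int),
       q + ((reads.map (fun r => r.2.2.toList.getD pos ' ')).countP
              (fun ch => decide ((ch.toNat : Int) - 33 < 20)) : Int)) := by
  induction reads with
  | nil => intro a c g t q; simp
  | cons r rs ih =>
    intro a c g t q
    rw [List.foldl_cons,
      show pvUpdate (a, c, g, t, q) (r.2.1.toList.getD pos ' ') (r.2.2.toList.getD pos ' ')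
        = (a + (if r.2.1.toList.getD pos ' ' = 'A' then 1 else 0),
           c + (if r.2.1.toList.getD pos ' ' = 'C' then 1 else 0),
           g + (if r.2.1.toList.getD pos ' ' = 'G' then 1 else 0),
           t + (if r.2.1.toList.getD pos ' ' = 'T' then 1 else 0),
           q + (if ((r.2.2.toList.getD pos ' ').toNat : Int) - 33 < 20 then 1 else 0)) from rfl,
      ih]
    simp only [List.map_cons, List.count_cons, List.countP_cons, Prod.mk.injEq]
    refine ⟨?_, ?_, ?_, ?_, ?_⟩ <;> · simp only [beq_iff_eq, decide_eq_true_eq]; split_ifs <;> push_cast <;> ring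



lemma bodyA_eval (reads : List (String × String × String)) (nr : Int) (pos : Nat) :
    (let dna : List Char := reads.map (fun r => PySem.List.pyGetD r.2.1.toList (pos : Int) ' ')
     let counts := countNucleotides dna
     let counts := counts.insert 'X' (nr - counts.values.sum)
     let phred : List Char := reads.map (fun r => PySem.List.pyGetD r.2.2.toList (pos : Int) ' ')
     let quality := phred.map phred33_to_q
     let counts := counts.insert 'q' (((quality.filter (fun q => q < 20)).map (fun _ => (1:Int))).sum)
     let counts := counts.insert 'Q' (nr - counts.getD 'q' 0)
     (['A','C','G','T','X','q','Q']).map (fun c => counts.getD c 0))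
    = (let cA : Int := (reads.map (fun r => r.2.1.toList.getD pos ' ')).count 'A'
       let cC : Int := (reads.map (fun r => r.2.1.toList.getD pos ' ')).count 'C'
       let cG : Int := (reads.map (fun r => r.2.1.toList.getD pos ' ')).count 'G'
       let cT : Int := (reads.map (fun r => r.2.1.toList.getD pos ' ')).count 'T'
       let cq : Int := (reads.map (fun r => r.2.2.toList.getD pos ' ')).countP
                         (fun ch => decide ((ch.toNat : Int) - 33 < 20))
       [cA, cC, cG, cT, nr - (cA + cC + cG + cT), cq, nr - cq]) := by
  simp only [PySem.List.pyGetD_natCast]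
  simp [countNucleotides, PySem.Dict.insert, PySem.Dict.empty, PySem.Dict.getD,
        PySem.Dict.get?_mk_cons, PySem.Dict.values, List.filter_map,
        List.countP_eq_length_filter]
  have hc := fun (c : Char) => PySem.Dict.getD_counter
    (xs := List.map (fun r => r.2.1.toList[pos]?.getD ' ') reads) (v := c)
  simp only [PySem.Dict.getD] at hc
  refine ⟨hc 'A', hc 'C', hc 'G', hc 'T', by rw [hc 'A', hc 'C', hc 'G', hc 'T']; ring, ?_⟩
  simp [Function.comp_def, phred33_to_q, List.map_const', List.sum_replicate]

-- ===== VERDICT (by name: the statement is the Claim_ definition above) =====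
theorem summarize_reads_spec : Claim_equal_summarize_reads := by
  intro reads hdom hpre
  obtain ⟨hne, -⟩ := hpre
  cases reads with
  | nil => exact absurd rfl hne
  | cons r0 rs =>
    show summarize_reads (r0 :: rs) = summarize_reads_alt (r0 :: rs)
    simp only [summarize_reads, summarize_reads_alt]
    have hfold : ∀ init, (r0 :: rs).foldl (fun acc r =>
        (PySem.List.enumerate acc).map (fun pst =>
          pvUpdate pst.2 (PySem.List.pyGetD r.2.1.toList pst.1 ' ')
                         (PySem.List.pyGetD r.2.2.toList pst.1 ' '))) init
          = (r0 :: rs).foldl pvStep init := fun _ => rfl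
    rw [hfold]
    apply List.ext_getElem?
    intro pos
    by_cases h : pos < r0.2.1.toList.length
    · rw [PySem.List.getElem?_map_pyRange_zero _ _ _ h, List.getElem?_map,
        foldl_pvStep_getElem? _ _ _ (by simpa using h)]
      have hinit : (List.replicate r0.2.1.toList.length ((0:Int), (0:Int), (0:Int), (0:Int), (0:Int)))[pos]!
          = (0, 0, 0, 0, 0) := by
        simp only [List.getElem!_eq_getElem?_getD, List.getElem?_replicate]
        rw [if_pos (by simpa using h)]; rfl
      rw [hinit, foldl_pvUpdate, bodyA_eval (r0 :: rs) ((r0 :: rs).length : Int) pos]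
      simp
    · rw [List.getElem?_eq_none, List.getElem?_eq_none]
      · simp only [List.length_map, foldl_pvStep_length, List.length_replicate]; omega
      · simp only [List.length_map, PySem.List.length_pyRange_one]; omega
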